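-- pv_equiv track=rewrite | github.com/kimjune01/june.kim | worklog/h26_gray_delegation.py | sequential_delegation
-- ===== SOURCE A (Python) =====
-- def sequential_delegation(neighborhoods, order):
--     """
--     Sequential delegation in given order.
--
--     Emitter order[0] is root — keeps all its edges.
--     Emitter order[i] delegates to the accumulated coverage of order[0..i-1].
--     Missed collectors for order[i] = N(order[i]) \ coverage_so_far.
--
--     Returns:
--         root_edges: |N(order[0])|
--         missed_per_step: list of |missed| for each delegation step
--         total_edges: root_edges + sum(missed_per_step)
--     """
--     root = order[0]
--     coverage = set(neighborhoods.get(root, set()))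
--     root_edges = len(coverage)
--     missed_per_step = []
--
--     for i in range(1, len(order)):
--         e = order[i]
--         n_e = neighborhoods.get(e, set())
--         missed = n_e - coverage
--         missed_per_step.append(len(missed))
--         coverage |= n_e
--
--     total_edges = root_edges + sum(missed_per_step)
--     return root_edges, missed_per_step, total_edges
-- ===== SOURCE B (Python) =====
-- def sequential_delegation(neighborhoods, order):
--     # For each collector, record the index of the first emitter in `order`
--     # whose neighborhood contains it; then tally collectors per first-index.
--     first = {}
--     for idx, e in enumerate(order):
--         for c in neighborhoods.get(e, set()):
--             first.setdefault(c, idx)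
--     counts = [0] * len(order)
--     for i in first.values():
--         counts[i] += 1
--     root_edges = counts[0]
--     missed_per_step = counts[1:]
--     return root_edges, missed_per_step, root_edges + sum(missed_per_step)
-- ===== Notes on version B (the rewrite author's own statement) =====
-- stated objective: alternative
-- what changed: Replaces the forward pass that maintains a growing coverage set and takes a set-difference per step with an inverted decomposition: one pass records each collector's first-seen emitter index (dict.setdefault), a tally pass turns those first-indices into per-step counts, and the answer is read off that counts array (root = counts[0], missed = counts[1:]).
import Mathlib
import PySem

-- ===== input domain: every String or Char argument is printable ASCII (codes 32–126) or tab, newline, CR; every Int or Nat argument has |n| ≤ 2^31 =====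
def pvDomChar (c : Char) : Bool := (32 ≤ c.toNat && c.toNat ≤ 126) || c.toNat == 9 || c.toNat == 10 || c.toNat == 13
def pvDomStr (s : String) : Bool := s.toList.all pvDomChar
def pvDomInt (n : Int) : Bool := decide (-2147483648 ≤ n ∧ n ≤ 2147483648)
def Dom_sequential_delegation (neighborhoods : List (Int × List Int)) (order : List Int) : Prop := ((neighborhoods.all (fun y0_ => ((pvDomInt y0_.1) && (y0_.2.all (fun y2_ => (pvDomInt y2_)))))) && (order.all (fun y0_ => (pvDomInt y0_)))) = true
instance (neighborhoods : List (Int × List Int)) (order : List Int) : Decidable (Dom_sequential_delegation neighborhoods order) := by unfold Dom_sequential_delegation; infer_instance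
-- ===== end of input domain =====

-- B inverts A's coverage-set loop: it records each collector's first emitter index and tallies
-- counts per index (alternative decomposition, same cost); return values proved equal on order ≠ [].

-- ===== PORT A =====
def sequential_delegation (neighborhoods : List (Int × List Int)) (order : List Int) : Int × List Int × Int :=
  match order with
  | [] => (0, [], 0)  -- Python raises IndexError on order[0]; excluded by Pre_
  | root :: rest =>
    let d := PySem.Dict.ofList neighborhoods
    let coverage := PySem.Set.ofList (d.getD root [])
    let root_edges : Int := PySem.Set.len coverage
    let st := rest.foldl
      (fun (st : List Int × PySem.Set Int) e =>
        (st.1 ++ [PySem.Set.len (PySem.Set.diff (PySem.Set.ofList (d.getD e [])) st.2)],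
         PySem.Set.union st.2 (PySem.Set.ofList (d.getD e []))))
      ([], coverage)
    (root_edges, st.1, root_edges + st.1.sum)

-- ===== PORT B =====
def sequential_delegation_alt (neighborhoods : List (Int × List Int)) (order : List Int) : Int × List Int × Int :=
  let d := PySem.Dict.ofList neighborhoods
  let first := (PySem.List.enumerate order).foldl
    (fun (f : PySem.Dict Int Int) p =>
      (PySem.Set.ofList (d.getD p.2 [])).foldl (fun f c => f.setdefault c p.1) f)
    PySem.Dict.empty
  let counts := first.values.foldl
    (fun (cs : List Int) i => PySem.List.pySetD cs i (PySem.List.pyGetD cs i 0 + 1))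
    (List.replicate order.length 0)
  match counts with
  | [] => (0, [], 0)  -- counts[0] raises IndexError in Python; excluded by Pre_
  | r :: tail => (r, tail, r + tail.sum)

-- ===== PRECONDITION & SPEC =====
-- Pre_ excludes only order = [], on which A raises IndexError at order[0] (B likewise at counts[0]).
def Pre_sequential_delegation (neighborhoods : List (Int × List Int)) (order : List Int) : Prop := order ≠ []
instance (neighborhoods : List (Int × List Int)) (order : List Int) : Decidable (Pre_sequential_delegation neighborhoods order) := by unfold Pre_sequential_delegation; infer_instance

def pvWitness_sequential_delegation : (List (Int × List Int)) × List Int := ([(1, [2, 3]), (2, [3])], [1, 2])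

def Spec_sequential_delegation (neighborhoods : List (Int × List Int)) (order : List Int) (out : Int × List Int × Int) : Prop := out = sequential_delegation_alt neighborhoods order
instance (neighborhoods : List (Int × List Int)) (order : List Int) (out : Int × List Int × Int) : Decidable (Spec_sequential_delegation neighborhoods order out) := by unfold Spec_sequential_delegation; infer_instance

-- ===== CLAIM (what is proved, stated in full; the proofs are below) =====
def Claim_equal_sequential_delegation : Prop := ∀ (neighborhoods : List (Int × List Int)) (order : List Int), Dom_sequential_delegation neighborhoods order → Pre_sequential_delegation neighborhoods order → Spec_sequential_delegation neighborhoods order (sequential_delegation neighborhoods order)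

-- ===== LEMMAS AND PROOFS =====

-- N(e) as a set, shared vocabulary of the proofs
def pvNb (d : PySem.Dict Int (List Int)) (e : Int) : PySem.Set Int := PySem.Set.ofList (d.getD e [])

-- the list of per-step missed counts A produces from coverage `cov`
def pvAmiss (d : PySem.Dict Int (List Int)) (cov : PySem.Set Int) : List Int → List Int
  | [] => []
  | e :: rest => PySem.Set.len (PySem.Set.diff (pvNb d e) cov) :: pvAmiss d (PySem.Set.union cov (pvNb d e)) rest

-- B's first-index loop, recursively over the remaining emitters with current index k
def pvBloop (d : PySem.Dict Int (List Int)) (f : PySem.Dict Int Int) (k : Int) : List Int → PySem.Dict Int Int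
  | [] => f
  | e :: rest => pvBloop d ((pvNb d e).foldl (fun f c => f.setdefault c k) f) (k + 1) rest

lemma pvA_foldl (d : PySem.Dict Int (List Int)) : ∀ (rest acc : List Int) (cov : PySem.Set Int),
    (rest.foldl
      (fun (st : List Int × PySem.Set Int) e =>
        (st.1 ++ [PySem.Set.len (PySem.Set.diff (PySem.Set.ofList (d.getD e [])) st.2)],
         PySem.Set.union st.2 (PySem.Set.ofList (d.getD e []))))
      (acc, cov)).1 = acc ++ pvAmiss d cov rest := by
  intro rest
  induction rest with
  | nil => intro acc cov; simp [pvAmiss]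
  | cons e rest ih =>
    intro acc cov
    simp only [List.foldl_cons]
    rw [ih]
    simp [pvAmiss, pvNb]

lemma pvB_enum (d : PySem.Dict Int (List Int)) : ∀ (l : List Int) (k : Int) (f : PySem.Dict Int Int),
    ((PySem.List.enumerate l k).foldl
      (fun (f : PySem.Dict Int Int) p =>
        (PySem.Set.ofList (d.getD p.2 [])).foldl (fun f c => f.setdefault c p.1) f) f)
    = pvBloop d f k l := by
  intro l
  induction l with
  | nil => intro k f; simp [PySem.List.enumerate_nil, pvBloop]
  | cons e rest ih =>
    intro k f
    rw [PySem.List.enumerate_cons]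
    simp only [List.foldl_cons]
    rw [ih]
    simp [pvBloop, pvNb]

lemma pvInner : ∀ (s : List Int) (f : PySem.Dict Int Int) (k : Int), s.Nodup →
    (s.foldl (fun f c => f.setdefault c k) f).keys = PySem.Set.update f.keys s
    ∧ ∀ j : Int, (s.foldl (fun f c => f.setdefault c k) f).values.count j
        = f.values.count j + (if j = k then (PySem.Set.diff s f.keys).length else 0) := by
  intro s
  induction s with
  | nil =>
    intro f k _
    constructor
    · simp [PySem.Set.update]
    · intro j; simp [PySem.Set.diff]
  | cons c s ih =>
    intro f k hnd
    simp only [List.nodup_cons] at hnd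
    obtain ⟨hcs, hnd⟩ := hnd
    simp only [List.foldl_cons]
    by_cases hc : f.contains c = true
    · have hset : f.setdefault c k = f := PySem.Dict.setdefault_of_contains f k hc
      rw [hset]
      obtain ⟨ihk, ihc⟩ := ih f k hnd
      have hmem : c ∈ f.keys := (PySem.Dict.contains_iff_mem_keys f c).1 hc
      constructor
      · rw [ihk]
        simp [PySem.Set.update, PySem.Set.add, PySem.Set.contains, hmem]
      · intro j
        rw [ihc j]
        have : PySem.Set.diff (c :: s) f.keys = PySem.Set.diff s f.keys := by
          simp [PySem.Set.diff, hmem]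
        rw [this]
    · have hset : f.setdefault c k = PySem.Dict.mk (f.items ++ [(c, k)]) := by
        simp [PySem.Dict.setdefault, hc]
      rw [hset]
      obtain ⟨ihk, ihc⟩ := ih (PySem.Dict.mk (f.items ++ [(c, k)])) k hnd
      have hnmem : c ∉ f.keys := fun h => hc ((PySem.Dict.contains_iff_mem_keys f c).2 h)
      have hkeys : (PySem.Dict.mk (f.items ++ [(c, k)])).keys = f.keys ++ [c] := by
        simp [PySem.Dict.keys]
      have hvals : (PySem.Dict.mk (f.items ++ [(c, k)])).values = f.values ++ [k] := by
        simp [PySem.Dict.values]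
      have hdiffs : PySem.Set.diff s (f.keys ++ [c]) = PySem.Set.diff s f.keys := by
        simp only [PySem.Set.diff]
        apply List.filter_congr
        intro x hx
        have : x ≠ c := fun h => hcs (h ▸ hx)
        simp [this]
      constructor
      · rw [ihk, hkeys]
        simp [PySem.Set.update, PySem.Set.add, PySem.Set.contains, hnmem]
      · intro j
        rw [ihc j, hkeys, hdiffs, hvals]
        have hdc : PySem.Set.diff (c :: s) f.keys = c :: PySem.Set.diff s f.keys := by
          simp [PySem.Set.diff, hnmem]
        rw [hdc]
        simp only [List.count_append, List.length_cons]
        by_cases hj : j = k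
        · subst hj; simp; omega
        · have hkj : ¬ (k = j) := fun h => hj h.symm
          simp [hj, hkj]

lemma pvMain (d : PySem.Dict Int (List Int)) : ∀ (rest : List Int) (k : Int) (f : PySem.Dict Int Int),
    (∀ v ∈ f.values, v < k) →
    (∀ j : Int, j < k → (pvBloop d f k rest).values.count j = f.values.count j)
    ∧ (∀ t : Nat, ((pvBloop d f k rest).values.count (k + t) : Int) = (pvAmiss d f.keys rest).getD t 0)
    ∧ (∀ v ∈ (pvBloop d f k rest).values, v ∈ f.values ∨ (k ≤ v ∧ v < k + rest.length)) := by
  intro rest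
  induction rest with
  | nil =>
    intro k f hb
    refine ⟨fun j _ => rfl, fun t => ?_, fun v hv => Or.inl hv⟩
    have h0 : f.values.count (k + t) = 0 := by
      apply List.count_eq_zero.2
      intro hmem
      have := hb _ hmem
      omega
    simp [pvBloop, pvAmiss, h0]
  | cons e rest ih =>
    intro k f hb
    obtain ⟨hk1, hc1⟩ := pvInner (pvNb d e) f k (PySem.Set.nodup_ofList _)
    set f₁ := (pvNb d e).foldl (fun f c => f.setdefault c k) f with hf₁
    have hb₁ : ∀ v ∈ f₁.values, v < k + 1 := by
      intro v hv
      have hpos : 0 < f₁.values.count v := List.count_pos_iff.2 hv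
      rw [hc1 v] at hpos
      by_cases hv' : v = k
      · omega
      · have : 0 < f.values.count v := by simpa [hv'] using hpos
        have := hb v (List.count_pos_iff.1 this)
        omega
    obtain ⟨ih1, ih2, ih3⟩ := ih (k + 1) f₁ hb₁
    have hcnt0 : f.values.count k = 0 := by
      apply List.count_eq_zero.2
      intro hmem
      have := hb _ hmem
      omega
    refine ⟨?_, ?_, ?_⟩
    · intro j hj
      have : (pvBloop d f k (e :: rest)).values.count j = f₁.values.count j := by
        simpa [pvBloop] using ih1 j (by omega)
      rw [this, hc1 j]
      simp [show j ≠ k by omega]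
    · intro t
      cases t with
      | zero =>
        have : (pvBloop d f k (e :: rest)).values.count k = f₁.values.count k := by
          simpa [pvBloop] using ih1 k (by omega)
        simp only [Nat.cast_zero, add_zero, this, hc1 k, hcnt0, pvAmiss]
        simp [PySem.Set.len]
      | succ t =>
        have h2 := ih2 t
        have harg : k + ((t : Nat) + 1 : Nat) = (k + 1) + (t : Nat) := by push_cast; ring
        rw [show (pvBloop d f k (e :: rest)) = pvBloop d f₁ (k + 1) rest from rfl]
        rw [harg, h2, hk1]
        simp [pvAmiss, PySem.Set.union]
    · intro v hv
      rw [show (pvBloop d f k (e :: rest)) = pvBloop d f₁ (k + 1) rest from rfl] at hv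
      rcases ih3 v hv with hmem | hrange
      · -- v ∈ f₁.values: either in f.values or v = k
        have hpos : 0 < f₁.values.count v := List.count_pos_iff.2 hmem
        rw [hc1 v] at hpos
        by_cases hv' : v = k
        · right; simp [hv']
        · left
          have : 0 < f.values.count v := by simpa [hv'] using hpos
          exact List.count_pos_iff.1 this
      · right
        simp only [List.length_cons]
        push_cast at hrange ⊢
        omega

lemma pvTally : ∀ (vs cs : List Int),
    (∀ v ∈ vs, 0 ≤ v ∧ v.toNat < cs.length) →
    vs.foldl (fun cs i => PySem.List.pySetD cs i (PySem.List.pyGetD cs i 0 + 1)) cs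
    = cs.mapIdx (fun t c => c + (vs.count (t : Int) : Int)) := by
  intro vs
  induction vs with
  | nil =>
    intro cs _
    simp only [List.foldl_nil, List.count_nil, Nat.cast_zero, add_zero]
    apply List.ext_getElem <;> simp
  | cons v vs ih =>
    intro cs hb
    obtain ⟨hv0, hvl⟩ := hb v List.mem_cons_self
    simp only [List.foldl_cons]
    rw [PySem.List.pySetD_of_nonneg _ _ hv0, PySem.List.pyGetD_of_nonneg _ _ hv0,
        ih _ (by intro w hw; have := hb w (List.mem_cons_of_mem _ hw); simpa using this)]
    apply List.ext_getElem
    · simp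
    · intro t h1 h2
      simp only [List.getElem_mapIdx, List.getElem_set]
      have ht : t < cs.length := by simpa using h2
      have hcast : ((v.toNat : Nat) : Int) = v := Int.toNat_of_nonneg hv0
      split_ifs with h
      · subst h
        rw [List.getD_eq_getElem _ _ ht, hcast, List.count_cons_self]
        push_cast; ring
      · have hne : ((t : Nat) : Int) ≠ v := by omega
        simp [show ¬ (v = ((t:Nat):Int)) from fun hh => hne hh.symm]

lemma pvAmiss_length (d : PySem.Dict Int (List Int)) : ∀ (l : List Int) (cov : PySem.Set Int),
    (pvAmiss d cov l).length = l.length := by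
  intro l
  induction l with
  | nil => intro cov; rfl
  | cons e rest ih => intro cov; simp [pvAmiss, ih]

-- ===== VERDICT (by name: the statement is the Claim_ definition above) =====
lemma pvEmptyVals : (PySem.Dict.empty : PySem.Dict Int Int).values = [] := rfl

lemma pvEmptyKeys : (PySem.Dict.empty : PySem.Dict Int Int).keys = [] := rfl

lemma pvAmiss_cons_nil (d : PySem.Dict Int (List Int)) (root : Int) (rest : List Int) :
    pvAmiss d [] (root :: rest) = PySem.Set.len (pvNb d root) :: pvAmiss d (pvNb d root) rest := by
  have hdiff : PySem.Set.diff (pvNb d root) [] = pvNb d root := by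
    simp [PySem.Set.diff]
  have hun : PySem.Set.union ([] : PySem.Set Int) (pvNb d root) = pvNb d root := by
    simp only [PySem.Set.union, PySem.Set.update_nil_left, pvNb, PySem.Set.ofList_ofList]
  rw [pvAmiss, hdiff, hun]

theorem sequential_delegation_spec : Claim_equal_sequential_delegation := by
  intro neighborhoods order _ hpre
  unfold Spec_sequential_delegation
  match order with
  | [] => exact absurd rfl hpre
  | root :: rest =>
    have h1 := pvA_foldl (PySem.Dict.ofList neighborhoods) rest []
      (PySem.Set.ofList ((PySem.Dict.ofList neighborhoods).getD root []))
    have h2 := pvB_enum (PySem.Dict.ofList neighborhoods) (root :: rest) 0 PySem.Dict.empty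
    obtain ⟨-, hcnt, hmem⟩ := pvMain (PySem.Dict.ofList neighborhoods) (root :: rest) 0
      PySem.Dict.empty (by rw [pvEmptyVals]; intro v hv; cases hv)
    rw [pvEmptyKeys] at hcnt
    set d := PySem.Dict.ofList neighborhoods with hd
    set first := pvBloop d PySem.Dict.empty 0 (root :: rest) with hfirst
    have hbound : ∀ v ∈ first.values, 0 ≤ v ∧ v.toNat < (List.replicate (root :: rest).length (0 : Int)).length := by
      intro v hv
      rcases hmem v hv with h | h
      · rw [pvEmptyVals] at h; cases h
      · simp only [List.length_replicate]; omega
    have htal := pvTally first.values (List.replicate (root :: rest).length (0 : Int)) hbound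
    have hcounts : first.values.foldl
        (fun cs i => PySem.List.pySetD cs i (PySem.List.pyGetD cs i 0 + 1))
        (List.replicate (root :: rest).length (0 : Int)) = pvAmiss d [] (root :: rest) := by
      rw [htal]
      apply List.ext_getElem
      · simp [pvAmiss_length]
      · intro t hl1 hl2
        simp only [List.getElem_mapIdx, List.getElem_replicate, zero_add]
        have ht : t < (pvAmiss d [] (root :: rest)).length := hl2
        have := hcnt t
        rw [zero_add] at this
        rw [this, List.getD_eq_getElem _ _ ht]
    simp only [sequential_delegation, sequential_delegation_alt, h1, ← hd, h2, ← hfirst,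
      hcounts, List.nil_append, pvAmiss_cons_nil]
    rfl
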